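-- pv_equiv track=rewrite | github.com/quantumlib/Stim | glue/lattice_surgery/lassynth/rewrite_passes/remove_unconnected.py | array3DAnd
-- ===== SOURCE A (Python) =====
-- from typing import Mapping, Any, Sequence, Union, Tuple
--
-- def array3DAnd(
--     arr0: Sequence[Sequence[Sequence[int]]], arr1: Sequence[Sequence[Sequence[int]]]
-- ) -> Sequence[Sequence[Sequence[int]]]:
--     """taking the AND of two arrays of bits"""
--     a = len(arr0)
--     b = len(arr0[0])
--     c = len(arr0[0][0])
--     arrAnd = [[[0 for _ in range(c)] for _ in range(b)] for _ in range(a)]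
--     for i in range(a):
--         for j in range(b):
--             for k in range(c):
--                 if arr0[i][j][k] == 1 and arr1[i][j][k] == 1:
--                     arrAnd[i][j][k] = 1
--     return arrAnd
-- ===== SOURCE B (Python) =====
-- def array3DAnd(arr0, arr1):
--     """taking the AND of two arrays of bits"""
--     shape = [len(arr0), len(arr0[0]), len(arr0[0][0])]
--
--     def rec(path):
--         if len(path) == 3:
--             i, j, k = path
--             return 1 if arr0[i][j][k] == 1 and arr1[i][j][k] == 1 else 0
--         return [rec(path + [n]) for n in range(shape[len(path)])]
--
--     return rec([])
-- ===== Notes on version B (the rewrite author's own statement) =====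
-- stated objective: alternative
-- what changed: B builds the result top-down by generic depth recursion over the shape vector with a path accumulator (rec(path) maps over range(shape[depth]) and computes each leaf at depth 3), instead of preallocating a zero-filled 3D array and mutating cells through three nested index loops.
import Mathlib
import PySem

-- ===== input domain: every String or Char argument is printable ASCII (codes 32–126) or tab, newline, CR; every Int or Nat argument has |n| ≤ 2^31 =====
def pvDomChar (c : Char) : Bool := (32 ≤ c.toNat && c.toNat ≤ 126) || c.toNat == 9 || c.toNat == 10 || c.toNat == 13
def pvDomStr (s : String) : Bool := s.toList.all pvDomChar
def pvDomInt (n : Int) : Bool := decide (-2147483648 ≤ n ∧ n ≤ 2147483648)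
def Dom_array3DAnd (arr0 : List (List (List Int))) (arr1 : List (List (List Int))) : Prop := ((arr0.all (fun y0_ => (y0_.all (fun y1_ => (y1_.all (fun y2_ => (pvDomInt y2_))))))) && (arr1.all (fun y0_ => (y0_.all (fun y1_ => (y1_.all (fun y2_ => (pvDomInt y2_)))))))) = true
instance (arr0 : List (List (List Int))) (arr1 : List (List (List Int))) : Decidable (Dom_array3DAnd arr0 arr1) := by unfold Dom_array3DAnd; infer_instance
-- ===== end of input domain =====

-- B builds the result top-down by depth recursion over the shape vector with a path
-- accumulator instead of A's preallocate-zeros-and-mutate triple loop (objective: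
-- alternative; same cost).

-- ===== PORT A =====
-- arr0[i][j][k] == 1 and arr1[i][j][k] == 1  (all reads in range under Pre_, so getD is exact)
def pvCond (arr0 : List (List (List Int))) (arr1 : List (List (List Int))) (i j k : Nat) : Bool :=
  (((arr0.getD i []).getD j []).getD k 0 == 1) && (((arr1.getD i []).getD j []).getD k 0 == 1)

-- arrAnd[i][j][k] = v
def pvSet3 (arr : List (List (List Int))) (i j k : Nat) (v : Int) : List (List (List Int)) :=
  arr.modify i (fun p => p.modify j (fun r => r.set k v))

def array3DAnd (arr0 : List (List (List Int))) (arr1 : List (List (List Int))) : List (List (List Int)) :=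
  let a := arr0.length
  let b := (arr0.getD 0 []).length
  let c := ((arr0.getD 0 []).getD 0 []).length
  let init := List.replicate a (List.replicate b (List.replicate c (0 : Int)))
  (List.range a).foldl (fun acc i =>
    (List.range b).foldl (fun acc j =>
      (List.range c).foldl (fun acc k =>
        if pvCond arr0 arr1 i j k then pvSet3 acc i j k 1 else acc) acc) acc) init

-- ===== PORT B =====
-- B's rec(path) at depth 3: unpack i, j, k from the path and AND the two bits
def pvLeafB (arr0 : List (List (List Int))) (arr1 : List (List (List Int))) (path : List Nat) : Int :=
  match path with
  | [i, j, k] =>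
      if (((arr0.getD i []).getD j []).getD k 0 == 1) && (((arr1.getD i []).getD j []).getD k 0 == 1)
      then 1 else 0
  | _ => 0  -- unreachable: pvLeafB is only applied to paths of length 3

-- B's rec at depths 2, 1, 0: map rec(path + [n]) over range(shape[len(path)]);
-- the three depths carry distinct return types, so the recursion is written out per level
def pvRecB1 (arr0 : List (List (List Int))) (arr1 : List (List (List Int))) (shape : List Nat) (path : List Nat) : List Int :=
  (List.range (shape.getD 2 0)).map (fun n => pvLeafB arr0 arr1 (path ++ [n]))

def pvRecB2 (arr0 : List (List (List Int))) (arr1 : List (List (List Int))) (shape : List Nat) (path : List Nat) : List (List Int) :=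
  (List.range (shape.getD 1 0)).map (fun n => pvRecB1 arr0 arr1 shape (path ++ [n]))

def pvRecB3 (arr0 : List (List (List Int))) (arr1 : List (List (List Int))) (shape : List Nat) (path : List Nat) : List (List (List Int)) :=
  (List.range (shape.getD 0 0)).map (fun n => pvRecB2 arr0 arr1 shape (path ++ [n]))

def array3DAnd_alt (arr0 : List (List (List Int))) (arr1 : List (List (List Int))) : List (List (List Int)) :=
  let shape := [arr0.length, (arr0.getD 0 []).length, ((arr0.getD 0 []).getD 0 []).length]
  pvRecB3 arr0 arr1 shape []

-- ===== PRECONDITION & SPEC =====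
-- Exactly the inputs on which the Python A returns (no IndexError): arr0 nonempty with a
-- nonempty first plane and, unless c = 0 (empty innermost loop, in which case nothing is ever
-- indexed), every plane of arr0 covering the b×c region and arr1 indexable at every position
-- where the corresponding arr0 cell equals 1 (Python's `and` short-circuits, so arr1 is only
-- read at those positions).
def Pre_array3DAnd (arr0 : List (List (List Int))) (arr1 : List (List (List Int))) : Prop :=
  (!arr0.isEmpty && !(arr0.getD 0 []).isEmpty &&
   (((arr0.getD 0 []).getD 0 []).isEmpty ||
   (List.range arr0.length).all (fun i =>
     ((arr0.getD 0 []).length ≤ (arr0.getD i []).length) &&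
     (List.range (arr0.getD 0 []).length).all (fun j =>
       (((arr0.getD 0 []).getD 0 []).length ≤ ((arr0.getD i []).getD j []).length) &&
       (List.range ((arr0.getD 0 []).getD 0 []).length).all (fun k =>
         (((arr0.getD i []).getD j []).getD k 0 != 1) ||
         (decide (i < arr1.length) && decide (j < (arr1.getD i []).length) &&
          decide (k < ((arr1.getD i []).getD j []).length))))))) = true

instance (arr0 : List (List (List Int))) (arr1 : List (List (List Int))) : Decidable (Pre_array3DAnd arr0 arr1) := by
  unfold Pre_array3DAnd; infer_instance

def pvWitness_array3DAnd : List (List (List Int)) × List (List (List Int)) :=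
  ([[[1, 0], [2, 1]]], [[[1, 1], [0, 1]]])

def Spec_array3DAnd (arr0 : List (List (List Int))) (arr1 : List (List (List Int))) (out : List (List (List Int))) : Prop := out = array3DAnd_alt arr0 arr1
instance (arr0 : List (List (List Int))) (arr1 : List (List (List Int))) (out : List (List (List Int))) : Decidable (Spec_array3DAnd arr0 arr1 out) := by unfold Spec_array3DAnd; infer_instance

-- ===== CLAIM (what is proved, stated in full; the proofs are below) =====
def Claim_equal_array3DAnd : Prop := ∀ (arr0 : List (List (List Int))) (arr1 : List (List (List Int))), Dom_array3DAnd arr0 arr1 → Pre_array3DAnd arr0 arr1 → Spec_array3DAnd arr0 arr1 (array3DAnd arr0 arr1)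

-- ===== LEMMAS AND PROOFS =====

theorem pv_modify_modify {α : Type} (l : List α) (i : Nat) (f g : α → α) :
    (l.modify i f).modify i g = l.modify i (fun x => g (f x)) := by
  apply List.ext_getElem
  · simp
  · intro n h1 h2
    simp [List.getElem_modify]
    split <;> simp_all

theorem pv_modify_id {α : Type} (l : List α) (i : Nat) :
    l.modify i (fun x => x) = l := by
  apply List.ext_getElem
  · simp
  · intro n h1 h2
    simp [List.getElem_modify]

-- a fold of modifications at a fixed index i commutes out to a single modify at i
theorem pv_foldl_modify_comm {α : Type} (i : Nat) (g : Nat → α → α) :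
    ∀ (xs : List Nat) (l : List α),
      xs.foldl (fun acc x => acc.modify i (g x)) l
        = l.modify i (fun p => xs.foldl (fun p x => g x p) p) := by
  intro xs
  induction xs with
  | nil => intro l; simp [pv_modify_id]
  | cons x xs ih =>
    intro l
    simp only [List.foldl_cons]
    rw [ih, pv_modify_modify]

theorem pv_foldl_modify_range_length {α : Type} (g : Nat → α → α) (n : Nat) (l : List α) :
    ((List.range n).foldl (fun acc x => acc.modify x (g x)) l).length = l.length := by
  induction n with
  | zero => simp
  | succ n ih => simp [List.range_succ, List.foldl_append, ih]

theorem pv_foldl_modify_range_getElem {α : Type} (g : Nat → α → α) (n : Nat) (l : List α)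
    (m : Nat) (hm : m < l.length) :
    ((List.range n).foldl (fun acc x => acc.modify x (g x)) l)[m]'(by
        rw [pv_foldl_modify_range_length]; exact hm)
      = if m < n then g m (l[m]'hm) else l[m]'hm := by
  induction n with
  | zero => simp
  | succ n ih =>
    simp only [List.range_succ, List.foldl_append, List.foldl_cons, List.foldl_nil]
    rw [List.getElem_modify]
    by_cases h : m = n
    · subst h
      simp [ih]
    · by_cases h2 : m < n
      · simp [h2, ih, Nat.lt_succ_of_lt h2]
        intro h'; exact absurd h'.symm h
      · have hn : ¬ m < n + 1 := by omega
        simp [h2, ih, hn]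
        intro h'; exact absurd h'.symm h

-- folding modifies over range n on a replicate-n list is the map of the update over range n
theorem pv_foldl_modify_replicate {α : Type} (g : Nat → α → α) (n : Nat) (v : α) :
    (List.range n).foldl (fun acc x => acc.modify x (g x)) (List.replicate n v)
      = (List.range n).map (fun m => g m v) := by
  apply List.ext_getElem
  · simp [pv_foldl_modify_range_length]
  · intro m h1 h2
    have hm : m < n := by simpa [pv_foldl_modify_range_length] using h1
    rw [pv_foldl_modify_range_getElem (hm := by simpa using hm)]
    simp [hm]

-- port A in fully commuted form: one modify per level
theorem pv_A_comm (arr0 arr1 : List (List (List Int))) :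
    array3DAnd arr0 arr1
      = (List.range arr0.length).foldl (fun acc i => acc.modify i (fun p =>
          (List.range (arr0.getD 0 []).length).foldl (fun p j => p.modify j (fun r =>
            (List.range ((arr0.getD 0 []).getD 0 []).length).foldl (fun r k =>
              r.modify k (fun x => if pvCond arr0 arr1 i j k then 1 else x)) r)) p))
          (List.replicate arr0.length (List.replicate (arr0.getD 0 []).length
            (List.replicate ((arr0.getD 0 []).getD 0 []).length (0 : Int)))) := by
  unfold array3DAnd
  apply PySem.List.foldl_congr_mem
  intro acc i _
  have h3 : ∀ (j : Nat) (acc : List (List (List Int))),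
      (List.range ((arr0.getD 0 []).getD 0 []).length).foldl (fun acc k =>
          if pvCond arr0 arr1 i j k then pvSet3 acc i j k 1 else acc) acc
        = acc.modify i (fun p => p.modify j (fun r =>
            (List.range ((arr0.getD 0 []).getD 0 []).length).foldl (fun r k =>
              r.modify k (fun x => if pvCond arr0 arr1 i j k then 1 else x)) r)) := by
    intro j acc
    have hstep : (fun (acc : List (List (List Int))) (k : Nat) =>
          if pvCond arr0 arr1 i j k then pvSet3 acc i j k 1 else acc)
        = fun acc k => acc.modify i (fun p => p.modify j (fun r =>
            r.modify k (fun x => if pvCond arr0 arr1 i j k then 1 else x))) := by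
      funext acc k
      by_cases h : pvCond arr0 arr1 i j k
      · simp [h, pvSet3, List.set_eq_modify]
      · simp [h, pv_modify_id]
    rw [hstep, pv_foldl_modify_comm]
    congr 1
    funext p
    rw [pv_foldl_modify_comm]
  calc (List.range (arr0.getD 0 []).length).foldl (fun acc j =>
          (List.range ((arr0.getD 0 []).getD 0 []).length).foldl (fun acc k =>
            if pvCond arr0 arr1 i j k then pvSet3 acc i j k 1 else acc) acc) acc
      = (List.range (arr0.getD 0 []).length).foldl (fun acc j =>
          acc.modify i (fun p => p.modify j (fun r =>
            (List.range ((arr0.getD 0 []).getD 0 []).length).foldl (fun r k =>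
              r.modify k (fun x => if pvCond arr0 arr1 i j k then 1 else x)) r))) acc := by
        apply PySem.List.foldl_congr_mem
        intro acc j _; exact h3 j acc
    _ = _ := by rw [pv_foldl_modify_comm]

-- ===== VERDICT (by name: the statement is the Claim_ definition above) =====
theorem array3DAnd_spec : Claim_equal_array3DAnd := by
  intro arr0 arr1 _ _
  unfold Spec_array3DAnd
  rw [pv_A_comm]
  simp only [pv_foldl_modify_replicate]
  simp [array3DAnd_alt, pvRecB3, pvRecB2, pvRecB1, pvLeafB, pvCond]
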